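-- pv_equiv track=rewrite | github.com/zerghamhaider-sys/bayutcalculator | app.py | consolidate_cart
-- ===== SOURCE A (Python) =====
-- def consolidate_cart(cart_items):
--     consolidated = {}
--     for item in cart_items:
--         key = item["name"]  # Use product name as key
--         if key in consolidated:
--             consolidated[key]["units"] += item["units"]
--             consolidated[key]["pkr"] += item["pkr"]
--             consolidated[key]["sar"] += item["sar"]
--             consolidated[key]["aed"] += item["aed"]
--         else:
--             consolidated[key] = item.copy()
--     return list(consolidated.values())
-- ===== SOURCE B (Python) =====
-- def consolidate_cart(cart_items):
--     # Pass 1: group the items by name, in first-appearance order.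
--     groups = {}
--     for item in cart_items:
--         groups.setdefault(item["name"], []).append(item)
--     # Pass 2: reduce each group to one item (copy of its first member,
--     # with the four amount fields summed over the rest of the group).
--     result = []
--     for group in groups.values():
--         total = group[0].copy()
--         for extra in group[1:]:
--             for field in ("units", "pkr", "sar", "aed"):
--                 total[field] += extra[field]
--         result.append(total)
--     return result
-- ===== Notes on version B (the rewrite author's own statement) =====
-- stated objective: alternative
-- what changed: Replaces A's single accumulate-in-place pass over a name-keyed dict of running totals by a collect-then-reduce decomposition: one pass groups the items by name in first-appearance order, a second pass reduces each group (copy of its first item plus the four summed fields).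
import Mathlib
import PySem

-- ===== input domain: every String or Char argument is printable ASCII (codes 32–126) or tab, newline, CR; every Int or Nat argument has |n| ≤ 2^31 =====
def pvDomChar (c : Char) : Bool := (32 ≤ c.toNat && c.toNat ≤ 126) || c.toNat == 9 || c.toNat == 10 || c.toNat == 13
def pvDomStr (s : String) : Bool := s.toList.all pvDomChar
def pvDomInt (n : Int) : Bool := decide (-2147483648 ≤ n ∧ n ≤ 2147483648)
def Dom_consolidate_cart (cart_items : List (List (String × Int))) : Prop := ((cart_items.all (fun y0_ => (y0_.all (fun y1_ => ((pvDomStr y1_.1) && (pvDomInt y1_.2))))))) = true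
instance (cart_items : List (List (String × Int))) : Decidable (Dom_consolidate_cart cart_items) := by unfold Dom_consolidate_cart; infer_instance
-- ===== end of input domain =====

-- B re-decomposes A's accumulate-in-place pass as collect-groups-then-reduce-each-group; return values agree on Pre_ (A's non-raising dict inputs).

-- ===== PORT A =====
-- Transliteration of A: one pass over the items, keeping a dict of running totals
-- keyed by item["name"]; `+=` on the four fields is d[k] = f(d.get(k, dflt)) = Dict.modify
-- (Pre_ guarantees every key read here is present, so the defaults are never used).
def consolidate_cart (cart_items : List (List (String × Int))) : List (List (String × Int)) :=
  let consolidated : PySem.Dict Int (PySem.Dict String Int) :=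
    cart_items.foldl (fun consolidated item =>
      let it : PySem.Dict String Int := PySem.Dict.mk item
      let key : Int := it.getD "name" 0                      -- key = item["name"]
      if consolidated.contains key then
        let cur := consolidated.getD key (PySem.Dict.mk [])
        let cur := cur.modify "units" 0 (· + it.getD "units" 0)   -- consolidated[key]["units"] += item["units"]
        let cur := cur.modify "pkr" 0 (· + it.getD "pkr" 0)
        let cur := cur.modify "sar" 0 (· + it.getD "sar" 0)
        let cur := cur.modify "aed" 0 (· + it.getD "aed" 0)
        consolidated.insert key cur
      else
        consolidated.insert key it                            -- consolidated[key] = item.copy()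
      ) PySem.Dict.empty
  consolidated.values.map (fun d => d.items)                  -- list(consolidated.values())

-- ===== PORT B =====
-- Transliteration of Source B: pass 1 groups the items by name (setdefault/append =
-- Dict.modify with default []), pass 2 reduces each group from its first member.
def consolidate_cart_alt (cart_items : List (List (String × Int))) : List (List (String × Int)) :=
  let groups : PySem.Dict Int (List (List (String × Int))) :=
    cart_items.foldl (fun groups item =>
      groups.modify ((PySem.Dict.mk item).getD "name" 0) [] (· ++ [item])) PySem.Dict.empty
  groups.values.map (fun group =>
    (match group with
     | [] => PySem.Dict.mk []                                 -- unreachable: every group is nonempty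
     | first :: rest =>
       rest.foldl (fun total extra =>
         ["units", "pkr", "sar", "aed"].foldl (fun total field =>
           total.modify field 0 (· + (PySem.Dict.mk extra).getD field 0)) total)
         (PySem.Dict.mk first)).items)

-- ===== PRECONDITION & SPEC =====
-- Pre_ = exactly the inputs on which Python A returns: every item dict has the key
-- "name", and every item whose name occurs in two or more items also has the four
-- amount keys (otherwise a `+=` line raises KeyError).  Each item's keys are Nodup
-- because the Python arguments are dicts, which cannot carry a duplicate key.
def Pre_consolidate_cart (cart_items : List (List (String × Int))) : Prop :=
  (∀ it ∈ cart_items, (it.map Prod.fst).Nodup ∧ "name" ∈ it.map Prod.fst) ∧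
  (∀ it ∈ cart_items,
     2 ≤ (cart_items.map (fun j => (PySem.Dict.mk j).getD "name" 0)).count
           ((PySem.Dict.mk it).getD "name" 0) →
     ("units" ∈ it.map Prod.fst ∧ "pkr" ∈ it.map Prod.fst ∧
      "sar" ∈ it.map Prod.fst ∧ "aed" ∈ it.map Prod.fst))
instance (cart_items : List (List (String × Int))) : Decidable (Pre_consolidate_cart cart_items) := by
  unfold Pre_consolidate_cart; infer_instance

def pvWitness_consolidate_cart : (List (List (String × Int))) :=
  [[("name", 1), ("units", 2), ("pkr", 300), ("sar", 4), ("aed", 5)],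
   [("name", 2), ("units", 1)],
   [("name", 1), ("units", 1), ("pkr", 10), ("sar", 1), ("aed", 1)]]

def Spec_consolidate_cart (cart_items : List (List (String × Int))) (out : List (List (String × Int))) : Prop := out = consolidate_cart_alt cart_items
instance (cart_items : List (List (String × Int))) (out : List (List (String × Int))) : Decidable (Spec_consolidate_cart cart_items out) := by unfold Spec_consolidate_cart; infer_instance

-- ===== CLAIM (what is proved, stated in full; the proofs are below) =====
def Claim_equal_consolidate_cart : Prop := ∀ (cart_items : List (List (String × Int))), Dom_consolidate_cart cart_items → Pre_consolidate_cart cart_items → Spec_consolidate_cart cart_items (consolidate_cart cart_items)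

-- ===== LEMMAS AND PROOFS =====

-- The grouping key of an item.
def pvKey (it : List (String × Int)) : Int := (PySem.Dict.mk it).getD "name" 0

-- Adding one item's four amount fields into a running total (A's four `+=` lines).
def pvAdd (t : PySem.Dict String Int) (e : List (String × Int)) : PySem.Dict String Int :=
  (((t.modify "units" 0 (· + (PySem.Dict.mk e).getD "units" 0)).modify
        "pkr" 0 (· + (PySem.Dict.mk e).getD "pkr" 0)).modify
        "sar" 0 (· + (PySem.Dict.mk e).getD "sar" 0)).modify
        "aed" 0 (· + (PySem.Dict.mk e).getD "aed" 0)

-- B's reduction of one group.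
def pvReduce : List (List (String × Int)) → PySem.Dict String Int
  | [] => PySem.Dict.mk []
  | h :: t => t.foldl pvAdd (PySem.Dict.mk h)

-- A's loop body and B's grouping loop body, named.
def pvStepA (d : PySem.Dict Int (PySem.Dict String Int)) (item : List (String × Int)) :
    PySem.Dict Int (PySem.Dict String Int) :=
  if d.contains (pvKey item) then
    d.insert (pvKey item) (pvAdd (d.getD (pvKey item) (PySem.Dict.mk [])) item)
  else
    d.insert (pvKey item) (PySem.Dict.mk item)

def pvStepB (g : PySem.Dict Int (List (List (String × Int)))) (item : List (String × Int)) :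
    PySem.Dict Int (List (List (String × Int))) :=
  g.insert (pvKey item) (g.getD (pvKey item) [] ++ [item])

-- The simulation map: a dict of groups ↦ the dict of their reductions.
def pvPhi (g : PySem.Dict Int (List (List (String × Int)))) :
    PySem.Dict Int (PySem.Dict String Int) :=
  PySem.Dict.mk (g.items.map (fun p => (p.1, pvReduce p.2)))

-- Every stored group is nonempty.
def pvInv (g : PySem.Dict Int (List (List (String × Int)))) : Prop :=
  ∀ p ∈ g.items, p.2 ≠ []

lemma pvPortA_eq (cart_items : List (List (String × Int))) :
    consolidate_cart cart_items =
      (cart_items.foldl pvStepA PySem.Dict.empty).values.map (fun d => d.items) := rfl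

lemma pvPortB_eq (cart_items : List (List (String × Int))) :
    consolidate_cart_alt cart_items =
      (cart_items.foldl pvStepB PySem.Dict.empty).values.map (fun grp => (pvReduce grp).items) := rfl

lemma pvPhi_items (g : PySem.Dict Int (List (List (String × Int)))) :
    (pvPhi g).items = g.items.map (fun p => (p.1, pvReduce p.2)) := rfl

lemma pvPhi_contains (g : PySem.Dict Int (List (List (String × Int)))) (k : Int) :
    (pvPhi g).contains k = g.contains k := by
  simp [pvPhi, PySem.Dict.contains, List.any_map, Function.comp_def]

lemma pvPhi_get? (g : PySem.Dict Int (List (List (String × Int)))) (k : Int) :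
    (pvPhi g).get? k = (g.get? k).map pvReduce := by
  simp [pvPhi, PySem.Dict.get?, List.find?_map, Function.comp_def, Option.map_map]

lemma pvPhi_insert (g : PySem.Dict Int (List (List (String × Int)))) (k : Int)
    (v : List (List (String × Int))) :
    pvPhi (g.insert k v) = (pvPhi g).insert k (pvReduce v) := by
  apply PySem.Dict.ext
  by_cases h : g.contains k
  · have h2 : (pvPhi g).contains k = true := by rw [pvPhi_contains]; exact h
    rw [pvPhi_items, PySem.Dict.items_insert_of_contains _ _ h,
        PySem.Dict.items_insert_of_contains _ _ h2, pvPhi_items, List.map_map, List.map_map]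
    apply List.map_congr_left
    intro p _
    by_cases hk : p.1 = k <;> simp [hk]
  · rw [Bool.not_eq_true] at h
    have h2 : (pvPhi g).contains k = false := by rw [pvPhi_contains]; exact h
    rw [pvPhi_items, PySem.Dict.items_insert_of_not_contains _ _ h,
        PySem.Dict.items_insert_of_not_contains _ _ h2, pvPhi_items, List.map_append]
    rfl

lemma pvReduce_append (grp : List (List (String × Int))) (it : List (String × Int))
    (h : grp ≠ []) : pvReduce (grp ++ [it]) = pvAdd (pvReduce grp) it := by
  cases grp with
  | nil => exact absurd rfl h
  | cons a t => simp [pvReduce, List.foldl_append]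

lemma pvStep_sim (g : PySem.Dict Int (List (List (String × Int)))) (it : List (String × Int))
    (hg : pvInv g) : pvStepA (pvPhi g) it = pvPhi (pvStepB g it) := by
  rw [pvStepB, pvPhi_insert, pvStepA, pvPhi_contains]
  by_cases h : g.contains (pvKey it)
  · simp only [h, if_true]
    cases hget : g.get? (pvKey it) with
    | none =>
      rw [PySem.Dict.contains_eq_isSome_get?, hget] at h
      simp at h
    | some grp =>
      have hmem : (pvKey it, grp) ∈ g.items := PySem.Dict.mem_items_of_get?_eq_some g hget
      have hne : grp ≠ [] := hg _ hmem
      rw [PySem.Dict.getD_eq_get?_getD, PySem.Dict.getD_eq_get?_getD, pvPhi_get?, hget]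
      simp [pvReduce_append grp it hne]
  · rw [Bool.not_eq_true] at h
    simp only [h, Bool.false_eq_true, if_false]
    rw [PySem.Dict.getD_of_not_contains _ _ h]
    simp [pvReduce]

lemma pvInv_step (g : PySem.Dict Int (List (List (String × Int)))) (it : List (String × Int))
    (hg : pvInv g) : pvInv (pvStepB g it) := by
  intro p hp
  rcases (PySem.Dict.mem_items_insert g (pvKey it) _ p).mp hp with h | ⟨h, _⟩
  · subst h; simp
  · exact hg _ h

lemma pvLoop_sim (l : List (List (String × Int))) :
    ∀ g, pvInv g →
      l.foldl pvStepA (pvPhi g) = pvPhi (l.foldl pvStepB g) ∧ pvInv (l.foldl pvStepB g) := by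
  induction l with
  | nil => intro g hg; exact ⟨rfl, hg⟩
  | cons it l ih =>
    intro g hg
    have hstep := pvStep_sim g it hg
    have hinv := pvInv_step g it hg
    simpa [List.foldl_cons, hstep] using ih (pvStepB g it) hinv

-- ===== VERDICT (by name: the statement is the Claim_ definition above) =====
theorem consolidate_cart_spec : Claim_equal_consolidate_cart := by
  intro cart_items _ _
  show consolidate_cart cart_items = consolidate_cart_alt cart_items
  rw [pvPortA_eq, pvPortB_eq]
  have h0 : pvInv PySem.Dict.empty := by intro p hp; cases hp
  have hphi0 : pvPhi PySem.Dict.empty = PySem.Dict.empty := rfl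
  obtain ⟨hsim, -⟩ := pvLoop_sim cart_items PySem.Dict.empty h0
  rw [hphi0] at hsim
  rw [hsim]
  simp [pvPhi, PySem.Dict.values, List.map_map, Function.comp]
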